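-- pv_equiv track=rewrite | github.com/timothyjamesbecker/somacx | somacx/variant_utils.py | get_inner_genotypes
-- ===== SOURCE A (Python) =====
-- def intersect(a,b):
--     if (a[0]<=b[1] and a[1]>=b[0] or \
--         b[0]<=a[0] and b[1]>=a[0] or \
--         a[0]>=b[0] and a[1]<=b[1] or \
--         b[0]>=a[1] and b[1]<=a[1]):
--         return True
--     else:
--         return False
--
-- def get_inner_genotypes(mut_pos,genotypes,inner_pos):
--     G = []
--     if len(genotypes)>0:
--         G = [[0 for i in range(len(genotypes[0]))] for j in range(len(inner_pos))]
--         for i in range(len(inner_pos)):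
--             for j in range(len(mut_pos)):
--                 if intersect(inner_pos[i],mut_pos[j]):
--                     G[i] = genotypes[j]
--     return G
-- ===== SOURCE B (Python) =====
-- def _overlaps(a, b):
--     # same relation as A's intersect (clause 2 of A is redundant: it implies clause 1)
--     return (a[0] <= b[1] and b[0] <= a[1]) or \
--            (b[0] <= a[0] and a[1] <= b[1]) or \
--            (a[1] <= b[0] and b[1] <= a[1])
--
-- def get_inner_genotypes(mut_pos, genotypes, inner_pos):
--     if not genotypes:
--         return []
--     zero = [0] * len(genotypes[0])
--     out = []
--     for a in inner_pos:
--         row = zero[:]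
--         for j in range(len(mut_pos) - 1, -1, -1):
--             if _overlaps(a, mut_pos[j]):
--                 row = genotypes[j]
--                 break
--         out.append(row)
--     return out
-- ===== Notes on version B (the rewrite author's own statement) =====
-- stated objective: faster
-- what changed: B replaces A's forward overwrite sweep (every mut interval tested, row repeatedly reassigned) by a per-inner reverse scan that stops at the first (i.e. last-index) overlapping mut interval, and uses a simplified 3-clause overlap predicate (A's second clause is redundant).
import Mathlib
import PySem

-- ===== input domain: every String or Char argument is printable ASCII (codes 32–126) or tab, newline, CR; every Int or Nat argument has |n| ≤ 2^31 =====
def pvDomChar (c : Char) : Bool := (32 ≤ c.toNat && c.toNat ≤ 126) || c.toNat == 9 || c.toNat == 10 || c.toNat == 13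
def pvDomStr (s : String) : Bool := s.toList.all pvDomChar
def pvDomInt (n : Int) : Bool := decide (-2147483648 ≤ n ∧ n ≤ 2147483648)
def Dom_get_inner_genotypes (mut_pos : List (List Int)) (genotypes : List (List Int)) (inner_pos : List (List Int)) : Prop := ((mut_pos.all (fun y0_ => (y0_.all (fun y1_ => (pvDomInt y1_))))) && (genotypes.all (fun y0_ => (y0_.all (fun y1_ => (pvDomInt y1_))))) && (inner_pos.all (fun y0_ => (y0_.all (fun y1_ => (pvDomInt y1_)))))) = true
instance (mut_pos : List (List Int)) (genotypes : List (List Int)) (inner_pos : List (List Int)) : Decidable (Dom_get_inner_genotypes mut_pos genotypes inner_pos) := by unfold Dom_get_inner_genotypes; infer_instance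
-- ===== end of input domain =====

-- B replaces A's forward overwrite sweep by a per-inner reverse scan stopping at the first
-- (= last-index) overlapping mut interval, with a simplified 3-clause overlap predicate.
-- Equivalence of return values on Pre_ (the inputs where the Python A returns).

-- ===== PORT A =====
-- Python's intersect; a[0],a[1],b[0],b[1] via getD (indices are 0,1 ≥ 0; Pre_ guarantees
-- length ≥ 2 wherever Python evaluates them, so getD is exact there).
def intersectA (a b : List Int) : Bool :=
  if (a.getD 0 0 ≤ b.getD 1 0 ∧ a.getD 1 0 ≥ b.getD 0 0) ∨
     (b.getD 0 0 ≤ a.getD 0 0 ∧ b.getD 1 0 ≥ a.getD 0 0) ∨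
     (a.getD 0 0 ≥ b.getD 0 0 ∧ a.getD 1 0 ≤ b.getD 1 0) ∨
     (b.getD 0 0 ≥ a.getD 1 0 ∧ b.getD 1 0 ≤ a.getD 1 0) then true else false

-- range(len(..)) over Nat indices (exact: lengths are nonnegative); genotypes[j] is
-- getD j [] (Python raises when j ≥ len(genotypes); Pre_ excludes those inputs).
def get_inner_genotypes (mut_pos : List (List Int)) (genotypes : List (List Int)) (inner_pos : List (List Int)) : List (List Int) :=
  if 0 < genotypes.length then
    let G0 : List (List Int) :=
      (List.range inner_pos.length).map (fun _ =>
        (List.range (genotypes.getD 0 []).length).map (fun _ => (0 : Int)))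
    (List.range inner_pos.length).foldl (fun G i =>
      (List.range mut_pos.length).foldl (fun G j =>
        if intersectA (inner_pos.getD i []) (mut_pos.getD j []) then
          G.set i (genotypes.getD j [])
        else G) G) G0
  else []

-- ===== PORT B =====
def ovlB (a b : List Int) : Bool :=
  decide ((a.getD 0 0 ≤ b.getD 1 0 ∧ b.getD 0 0 ≤ a.getD 1 0) ∨
          (b.getD 0 0 ≤ a.getD 0 0 ∧ a.getD 1 0 ≤ b.getD 1 0) ∨
          (a.getD 1 0 ≤ b.getD 0 0 ∧ b.getD 1 0 ≤ a.getD 1 0))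

-- the for-j-with-break loop is ported as find? over the reversed index range
def get_inner_genotypes_alt (mut_pos : List (List Int)) (genotypes : List (List Int)) (inner_pos : List (List Int)) : List (List Int) :=
  match genotypes with
  | [] => []
  | g0 :: _ =>
    let zero : List Int := List.replicate g0.length (0 : Int)
    inner_pos.map (fun a =>
      match (List.range mut_pos.length).reverse.find? (fun j => ovlB a (mut_pos.getD j [])) with
      | some j => genotypes.getD j []
      | none => zero)

-- ===== PRECONDITION & SPEC =====
-- Pre_ is exactly the set of inputs on which the Python A returns (no IndexError): either a
-- loop is empty, or every scanned interval has ≥ 2 entries and no inner interval overlaps a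
-- mut interval whose index falls outside genotypes.
def Pre_get_inner_genotypes (mut_pos : List (List Int)) (genotypes : List (List Int)) (inner_pos : List (List Int)) : Prop :=
  genotypes = [] ∨ inner_pos = [] ∨ mut_pos = [] ∨
  ((∀ a ∈ inner_pos, 2 ≤ a.length) ∧ (∀ b ∈ mut_pos, 2 ≤ b.length) ∧
   (∀ b ∈ mut_pos.drop genotypes.length, ∀ a ∈ inner_pos, intersectA a b = false))
instance (mut_pos : List (List Int)) (genotypes : List (List Int)) (inner_pos : List (List Int)) : Decidable (Pre_get_inner_genotypes mut_pos genotypes inner_pos) := by unfold Pre_get_inner_genotypes; infer_instance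

def pvWitness_get_inner_genotypes : List (List Int) × List (List Int) × List (List Int) :=
  ([[1, 1]], [[2, 3]], [[0, 5]])

def Spec_get_inner_genotypes (mut_pos : List (List Int)) (genotypes : List (List Int)) (inner_pos : List (List Int)) (out : List (List Int)) : Prop := out = get_inner_genotypes_alt mut_pos genotypes inner_pos
instance (mut_pos : List (List Int)) (genotypes : List (List Int)) (inner_pos : List (List Int)) (out : List (List Int)) : Decidable (Spec_get_inner_genotypes mut_pos genotypes inner_pos out) := by unfold Spec_get_inner_genotypes; infer_instance

-- ===== CLAIM (what is proved, stated in full; the proofs are below) =====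
def Claim_equal_get_inner_genotypes : Prop := ∀ (mut_pos : List (List Int)) (genotypes : List (List Int)) (inner_pos : List (List Int)), Dom_get_inner_genotypes mut_pos genotypes inner_pos → Pre_get_inner_genotypes mut_pos genotypes inner_pos → Spec_get_inner_genotypes mut_pos genotypes inner_pos (get_inner_genotypes mut_pos genotypes inner_pos)

-- ===== LEMMAS AND PROOFS =====

-- A's 4-clause predicate equals B's 3-clause one (A's clause 2 is redundant).
theorem intersect_eq (a b : List Int) : intersectA a b = ovlB a b := by
  unfold intersectA ovlB
  by_cases h : (a.getD 0 0 ≤ b.getD 1 0 ∧ a.getD 1 0 ≥ b.getD 0 0) ∨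
     (b.getD 0 0 ≤ a.getD 0 0 ∧ b.getD 1 0 ≥ a.getD 0 0) ∨
     (a.getD 0 0 ≥ b.getD 0 0 ∧ a.getD 1 0 ≤ b.getD 1 0) ∨
     (b.getD 0 0 ≥ a.getD 1 0 ∧ b.getD 1 0 ≤ a.getD 1 0)
  · rw [if_pos h]
    exact (decide_eq_true (by omega)).symm
  · rw [if_neg h]
    exact (decide_eq_false (by omega)).symm

-- inner j-loop: all sets hit index i, so it is one set of the folded row value
theorem inner_fold_set {X : Type} (p : Nat → Bool) (v : Nat → X) (d : X) :
    ∀ (js : List Nat) (G : List X) (i : Nat), i < G.length →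
      js.foldl (fun G j => if p j then G.set i (v j) else G) G
        = G.set i (js.foldl (fun r j => if p j then v j else r) (G.getD i d)) := by
  intro js
  induction js with
  | nil =>
    intro G i hi
    rw [List.foldl_nil, List.foldl_nil, List.getD_eq_getElem _ _ hi, List.set_getElem_self]
  | cons j js ih =>
    intro G i hi
    cases hp : p j
    · rw [List.foldl_cons, if_neg (by simp [hp]), ih G i hi, List.foldl_cons,
          if_neg (by simp [hp])]
    · rw [List.foldl_cons, if_pos (by simp [hp]),
          ih (G.set i (v j)) i (by simpa using hi), List.foldl_cons, if_pos (by simp [hp]),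
          List.set_set, List.getD_eq_getElem _ _ (by simpa using hi)]
      rw [List.getElem_set_self]

-- fold of "if p then v j else acc" = value at the last satisfying index
theorem fold_last_eq_find {X : Type} (p : Nat → Bool) (v : Nat → X) :
    ∀ (js : List Nat) (r0 : X),
      js.foldl (fun r j => if p j then v j else r) r0
        = (match js.reverse.find? p with | some j => v j | none => r0) := by
  intro js
  induction js with
  | nil => intro r0; simp
  | cons j js ih =>
    intro r0
    simp only [List.foldl_cons, List.reverse_cons, List.find?_append]
    rw [ih]
    cases hf : js.reverse.find? p with
    | some k => simp
    | none =>
      cases hp : p j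
      · simp [List.find?, hp]
      · simp [List.find?, hp]

-- outer i-loop: steps that act as set-at-i compute a map (step given abstractly
-- so the nested inner fold can be plugged in with its length side-condition)
theorem outer_fold_map {X : Type} (step : List X → Nat → List X) (w : Nat → X → X) (d : X)
    (hstep : ∀ (G : List X) (i : Nat), i < G.length → step G i = G.set i (w i (G.getD i d))) :
    ∀ (n : Nat) (G : List X), n ≤ G.length →
      (List.range n).foldl step G
        = (List.range n).map (fun i => w i (G.getD i d)) ++ G.drop n := by
  intro n
  induction n with
  | zero => intro G _; simp
  | succ n ih =>
    intro G hn
    have hnG : n < G.length := by omega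
    rw [List.range_succ, List.foldl_append, List.foldl_cons, List.foldl_nil,
        ih G (by omega)]
    have hlen : ((List.range n).map (fun i => w i (G.getD i d))).length = n := by simp
    have hget : (((List.range n).map (fun i => w i (G.getD i d))) ++ G.drop n).getD n d
        = G.getD n d := by
      rw [List.getD_eq_getElem _ _ (by simp; omega),
          List.getD_eq_getElem _ _ hnG,
          List.getElem_append_right (by omega)]
      simp
    rw [hstep _ n (by simp; omega), hget]
    have hset : (((List.range n).map (fun i => w i (G.getD i d))) ++ G.drop n).set n
          (w n (G.getD n d))
        = ((List.range n).map (fun i => w i (G.getD i d))) ++ [w n (G.getD n d)] ++ G.drop (n+1) := by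
      rw [List.set_append_right _ _ (by omega), hlen]
      have hd : (G.drop n).set (n - n) (w n (G.getD n d))
          = w n (G.getD n d) :: G.drop (n+1) := by
        rw [Nat.sub_self, ← List.getElem_cons_drop hnG, List.set_cons_zero]
      rw [hd]; simp
    rw [hset]
    simp [List.map_append]

-- ===== VERDICT (by name: the statement is the Claim_ definition above) =====
theorem get_inner_genotypes_spec : Claim_equal_get_inner_genotypes := by
  intro mut_pos genotypes inner_pos _ _
  unfold Spec_get_inner_genotypes
  unfold get_inner_genotypes get_inner_genotypes_alt
  cases genotypes with
  | nil => simp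
  | cons g0 gs =>
    simp only [List.length_cons, Nat.zero_lt_succ, if_pos]
    rw [outer_fold_map
      (fun G i => (List.range mut_pos.length).foldl (fun G j =>
        if intersectA (inner_pos.getD i []) (mut_pos.getD j []) then
          G.set i ((g0 :: gs).getD j []) else G) G)
      (fun i r => (List.range mut_pos.length).foldl (fun r j =>
        if intersectA (inner_pos.getD i []) (mut_pos.getD j []) then
          (g0 :: gs).getD j [] else r) r)
      ([] : List Int)
      (fun G i hi => inner_fold_set
        (fun j => intersectA (inner_pos.getD i []) (mut_pos.getD j []))
        (fun j => (g0 :: gs).getD j []) [] (List.range mut_pos.length) G i hi)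
      inner_pos.length _ (by simp)]
    apply List.ext_getElem
    · simp
    · intro i h1 h2
      have hin : i < inner_pos.length := by simpa using h2
      rw [List.getElem_append_left (by simpa using hin), List.getElem_map, List.getElem_map,
          List.getElem_range, fold_last_eq_find]
      have hz : ((List.range inner_pos.length).map (fun _ =>
          (List.range ((g0 :: gs).getD 0 []).length).map (fun _ => (0 : Int)))).getD i []
          = List.replicate g0.length (0 : Int) := by
        rw [List.getD_eq_getElem _ _ (by simpa using hin)]
        simp [List.map_const']
      have ha : inner_pos.getD i [] = inner_pos[i] := by
        rw [List.getD_eq_getElem _ _ hin]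
      rw [hz, ha]
      simp only [intersect_eq]
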